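-- pv_equiv track=rewrite | github.com/foolishzhao/leetcode | python3/_0321_Create_Maximum_Number/main.py | mergeHelper
-- ===== SOURCE A (Python) =====
-- def mergeHelper(nums1, nums2):
--     res = []
--     while nums1 or nums2:
--         if nums1 > nums2:
--             res.append(nums1[0])
--             nums1 = nums1[1:]
--         else:
--             res.append(nums2[0])
--             nums2 = nums2[1:]
--
--     return res
-- ===== SOURCE B (Python) =====
-- def _rle(xs):
--     # run-length encode: list of (value, count), counts >= 1
--     runs = []
--     k = 0
--     while k < len(xs):
--         t = k
--         while t < len(xs) and xs[t] == xs[k]: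
--             t += 1
--         runs.append((xs[k], t - k))
--         k = t
--     return runs
--
--
-- def _gt_runs(a, i, ca, b, j, cb):
--     # True iff the expansion of a[i:] (first run truncated to ca elements)
--     # is lexicographically greater than the expansion of b[j:] (first run cb)
--     while i < len(a) and j < len(b):
--         if a[i][0] != b[j][0]:
--             return a[i][0] > b[j][0]
--         if ca == cb:
--             i += 1
--             j += 1
--             ca = a[i][1] if i < len(a) else 0
--             cb = b[j][1] if j < len(b) else 0
--         elif ca < cb:
--             cb -= ca
--             i += 1
--             ca = a[i][1] if i < len(a) else 0
--         else:
--             ca -= cb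
--             j += 1
--             cb = b[j][1] if j < len(b) else 0
--     return i < len(a)
--
--
-- def mergeHelper(nums1, nums2):
--     a = _rle(nums1)
--     b = _rle(nums2)
--     i = j = 0
--     ca = a[0][1] if a else 0
--     cb = b[0][1] if b else 0
--     res = []
--     while i < len(a) or j < len(b):
--         if _gt_runs(a, i, ca, b, j, cb):
--             res.append(a[i][0])
--             ca -= 1
--             if ca == 0:
--                 i += 1
--                 ca = a[i][1] if i < len(a) else 0
--         else:
--             res.append(b[j][0])
--             cb -= 1
--             if cb == 0:
--                 j += 1
--                 cb = b[j][1] if j < len(b) else 0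
--     return res
-- ===== Notes on version B (the rewrite author's own statement) =====
-- stated objective: faster
-- what changed: B run-length encodes both lists once and merges with index pointers whose suffix comparison walks runs (consuming min of the current run counts per step) instead of A's per-element list slicing and whole-list '>' comparisons.
import Mathlib
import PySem

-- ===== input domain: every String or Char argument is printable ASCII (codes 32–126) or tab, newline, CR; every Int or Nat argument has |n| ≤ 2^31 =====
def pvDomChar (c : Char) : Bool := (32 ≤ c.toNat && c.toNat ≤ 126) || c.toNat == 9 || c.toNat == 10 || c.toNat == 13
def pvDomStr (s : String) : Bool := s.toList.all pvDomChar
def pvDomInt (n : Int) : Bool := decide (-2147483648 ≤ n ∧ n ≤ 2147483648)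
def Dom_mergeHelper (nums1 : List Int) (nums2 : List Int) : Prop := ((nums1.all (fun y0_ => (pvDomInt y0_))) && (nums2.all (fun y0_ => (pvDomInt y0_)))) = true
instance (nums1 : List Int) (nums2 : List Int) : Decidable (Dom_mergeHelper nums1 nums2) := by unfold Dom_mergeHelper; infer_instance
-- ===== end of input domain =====

-- B replaces A's repeated slicing and whole-list comparisons by run-length encoding both lists
-- once and merging with index pointers whose suffix comparison walks runs, not elements (objective: faster).


-- ===== PORT A =====
-- Python's '>' on two int lists: lexicographic, longer wins on equal prefix.
def pyListGt : List Int → List Int → Bool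
  | [], _ => false
  | _ :: _, [] => true
  | a :: as, b :: bs => if a > b then true else if a < b then false else pyListGt as bs

-- A's while-loop; the fuel counter (one element is consumed per iteration) only makes it total
def mergeGo : Nat → List Int → List Int → List Int
  | 0, _, _ => []
  | f + 1, nums1, nums2 =>
    if nums1 = [] ∧ nums2 = [] then []
    else if pyListGt nums1 nums2 then
      match nums1 with
      | a :: t => a :: mergeGo f t nums2
      | [] => []          -- unreachable: pyListGt [] _ = false
    else
      match nums2 with
      | b :: t => b :: mergeGo f nums1 t
      | [] => []          -- unreachable: pyListGt nums1 [] = true when nums1 ≠ []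

-- literal port of A: while nums1 or nums2: compare, take head, slice off the head
def mergeHelper (nums1 : List Int) (nums2 : List Int) : List Int :=
  mergeGo (nums1.length + nums2.length) nums1 nums2

-- ===== PORT B =====
-- inner while of _rle: advance t while xs[t] == xs[k] (fuel = remaining length, consumed one per step)
def runEndGo : Nat → List Int → Nat → Nat → Nat
  | 0, _, _, t => t
  | f + 1, xs, k, t =>
    if t < xs.length ∧ xs.getD t 0 = xs.getD k 0 then runEndGo f xs k (t + 1) else t

-- outer while of _rle: one run per iteration (fuel = remaining length)
def rleGo : Nat → List Int → Nat → List (Int × Int)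
  | 0, _, _ => []
  | f + 1, xs, k =>
    if k < xs.length then
      let t := runEndGo (xs.length - k) xs k k
      (xs.getD k 0, (t : Int) - (k : Int)) :: rleGo f xs t
    else []

def rle (xs : List Int) : List (Int × Int) := rleGo xs.length xs 0

-- `r[m][1] if m < len(r) else 0`
def getCnt (r : List (Int × Int)) (m : Nat) : Int :=
  if m < r.length then (r.getD m (0, 0)).2 else 0

-- _gt_runs: walk both run lists, consuming min(ca, cb) of the current runs per step
def gtRunsGo : Nat → List (Int × Int) → List (Int × Int) → Nat → Int → Nat → Int → Bool
  | 0, a, _, i, _, _, _ => decide (i < a.length)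
  | f + 1, a, b, i, ca, j, cb =>
    if i < a.length ∧ j < b.length then
      if (a.getD i (0, 0)).1 ≠ (b.getD j (0, 0)).1 then
        decide ((a.getD i (0, 0)).1 > (b.getD j (0, 0)).1)
      else if ca = cb then gtRunsGo f a b (i + 1) (getCnt a (i + 1)) (j + 1) (getCnt b (j + 1))
      else if ca < cb then gtRunsGo f a b (i + 1) (getCnt a (i + 1)) j (cb - ca)
      else gtRunsGo f a b i (ca - cb) (j + 1) (getCnt b (j + 1))
    else decide (i < a.length)

def gtRuns (a b : List (Int × Int)) (i : Nat) (ca : Int) (j : Nat) (cb : Int) : Bool :=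
  gtRunsGo (a.length + b.length) a b i ca j cb

-- main while of B: take one element of the greater suffix per iteration (fuel = total elements)
def mloopGo : Nat → List (Int × Int) → List (Int × Int) → Nat → Int → Nat → Int → List Int
  | 0, _, _, _, _, _, _ => []
  | f + 1, a, b, i, ca, j, cb =>
    if i < a.length ∨ j < b.length then
      if gtRuns a b i ca j cb then
        (a.getD i (0, 0)).1 ::
          (if ca - 1 = 0 then mloopGo f a b (i + 1) (getCnt a (i + 1)) j cb
           else mloopGo f a b i (ca - 1) j cb)
      else
        (b.getD j (0, 0)).1 ::
          (if cb - 1 = 0 then mloopGo f a b i ca (j + 1) (getCnt b (j + 1))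
           else mloopGo f a b i ca j (cb - 1))
    else []

def mergeHelper_alt (nums1 : List Int) (nums2 : List Int) : List Int :=
  let a := rle nums1
  let b := rle nums2
  mloopGo (nums1.length + nums2.length) a b 0 (getCnt a 0) 0 (getCnt b 0)

-- ===== PRECONDITION & SPEC =====
def Spec_mergeHelper (nums1 : List Int) (nums2 : List Int) (out : List Int) : Prop := out = mergeHelper_alt nums1 nums2
instance (nums1 : List Int) (nums2 : List Int) (out : List Int) : Decidable (Spec_mergeHelper nums1 nums2 out) := by unfold Spec_mergeHelper; infer_instance

-- ===== CLAIM (what is proved, stated in full; the proofs are below) =====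
def Claim_equal_mergeHelper : Prop := ∀ (nums1 : List Int) (nums2 : List Int), Dom_mergeHelper nums1 nums2 → Spec_mergeHelper nums1 nums2 (mergeHelper nums1 nums2)

-- ===== LEMMAS AND PROOFS =====

-- expansion of a run list, and of a run-list suffix whose first run is truncated to c elements
def expandR : List (Int × Int) → List Int
  | [] => []
  | (v, c) :: t => List.replicate c.toNat v ++ expandR t

def expandFrom (r : List (Int × Int)) (i : Nat) (c : Int) : List Int :=
  match r.drop i with
  | [] => []
  | (v, _) :: t => List.replicate c.toNat v ++ expandR t

theorem mergeGo_succ (f : Nat) (nums1 nums2 : List Int) :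
    mergeGo (f + 1) nums1 nums2 =
      (if nums1 = [] ∧ nums2 = [] then []
       else if pyListGt nums1 nums2 then
         match nums1 with
         | a :: t => a :: mergeGo f t nums2
         | [] => []
       else
         match nums2 with
         | b :: t => b :: mergeGo f nums1 t
         | [] => []) := rfl

-- Python list '>' ignores a common replicated prefix
theorem pyListGt_replicate (n : Nat) (v : Int) (A B : List Int) :
    pyListGt (List.replicate n v ++ A) (List.replicate n v ++ B) = pyListGt A B := by
  induction n with
  | zero => simp
  | succ n ih => simp [List.replicate_succ, pyListGt, ih]

-- spec of runEndGo
theorem runEndGo_spec (xs : List Int) (k : Nat) :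
    ∀ (f t : Nat), xs.length - t ≤ f → t ≤ xs.length →
      t ≤ runEndGo f xs k t ∧ runEndGo f xs k t ≤ xs.length ∧
      (∀ m, t ≤ m → m < runEndGo f xs k t → xs.getD m 0 = xs.getD k 0) := by
  intro f
  induction f with
  | zero =>
    intro t hf ht
    refine ⟨Nat.le_refl _, ?_, ?_⟩
    · simpa [runEndGo] using ht
    · simp [runEndGo]; omega
  | succ f ih =>
    intro t hf ht
    rw [runEndGo]
    by_cases hc : t < xs.length ∧ xs.getD t 0 = xs.getD k 0
    · rw [if_pos hc]
      obtain ⟨h1, h2, h3⟩ := ih (t + 1) (by omega) (by omega)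
      refine ⟨by omega, h2, ?_⟩
      intro m hm1 hm2
      rcases Nat.eq_or_lt_of_le hm1 with rfl | hm1'
      · exact hc.2
      · exact h3 m hm1' hm2
    · rw [if_neg hc]
      exact ⟨Nat.le_refl _, ht, fun m hm1 hm2 => by omega⟩

-- a block of equal values expands to a replicate
theorem drop_eq_replicate_append (xs : List Int) (v : Int) :
    ∀ (d k : Nat), k + d ≤ xs.length →
      (∀ m, k ≤ m → m < k + d → xs.getD m 0 = v) →
      xs.drop k = List.replicate d v ++ xs.drop (k + d) := by
  intro d
  induction d with
  | zero => intro k _ _; simp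
  | succ d ih =>
    intro k hkd hall
    have hk : k < xs.length := by omega
    rw [List.drop_eq_getElem_cons hk]
    have hv : xs[k] = v := by
      have := hall k (Nat.le_refl _) (by omega)
      simpa [List.getD, List.getElem?_eq_getElem hk] using this
    have := ih (k + 1) (by omega) (fun m h1 h2 => hall m (by omega) (by omega))
    rw [List.replicate_succ, hv, this]
    simp [List.cons_append]
    congr 1
    omega

-- rle correctness: the runs expand back to the list suffix, and every count is ≥ 1
theorem rleGo_spec (xs : List Int) :
    ∀ (f k : Nat), xs.length - k ≤ f →
      expandR (rleGo f xs k) = xs.drop k ∧ (∀ p ∈ rleGo f xs k, 1 ≤ p.2) := by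
  intro f
  induction f with
  | zero =>
    intro k hf
    have : xs.length ≤ k := by omega
    rw [List.drop_eq_nil_iff.mpr (by omega)]
    simp [rleGo, expandR]
  | succ f ih =>
    intro k hf
    rw [rleGo]
    by_cases hk : k < xs.length
    · rw [if_pos hk]
      have hfk : xs.length - k = (xs.length - (k + 1)) + 1 := by omega
      obtain ⟨h1, h2, h3⟩ := runEndGo_spec xs k (xs.length - k) k (by omega) (by omega)
      set t := runEndGo (xs.length - k) xs k k with hT
      have htk : k < t := by
        rw [hT, hfk, runEndGo, if_pos ⟨hk, rfl⟩]
        have := runEndGo_spec xs k (xs.length - (k + 1)) (k + 1) (by omega) (by omega)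
        omega
      obtain ⟨ih1, ih2⟩ := ih t (by omega)
      constructor
      · show List.replicate ((t : Int) - (k : Int)).toNat (xs.getD k 0) ++ expandR (rleGo f xs t) = xs.drop k
        have htn : ((t : Int) - (k : Int)).toNat = t - k := by omega
        rw [htn, ih1]
        have := drop_eq_replicate_append xs (xs.getD k 0) (t - k) k (by omega)
          (fun m hm1 hm2 => h3 m hm1 (by omega))
        rw [this]
        congr 2
        omega
      · intro p hp
        rcases List.mem_cons.mp hp with rfl | hp'
        · show (1 : Int) ≤ (t : Int) - (k : Int); omega
        · exact ih2 p hp'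
    · rw [if_neg hk]
      rw [List.drop_eq_nil_iff.mpr (by omega)]
      simp [expandR]

theorem expandR_cons (p : Int × Int) (t : List (Int × Int)) :
    expandR (p :: t) = List.replicate p.2.toNat p.1 ++ expandR t := by
  cases p; rfl

theorem expandFrom_eq (r : List (Int × Int)) (m : Nat) (c : Int) (h : m < r.length) :
    expandFrom r m c = List.replicate c.toNat (r.getD m (0, 0)).1 ++ expandR (r.drop (m + 1)) := by
  unfold expandFrom
  rw [List.drop_eq_getElem_cons h]
  rcases hv : r[m] with ⟨v, c2⟩
  simp [List.getD, List.getElem?_eq_getElem h, hv]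

theorem expandFrom_nil (r : List (Int × Int)) (m : Nat) (c : Int) (h : r.length ≤ m) :
    expandFrom r m c = [] := by
  unfold expandFrom
  rw [List.drop_eq_nil_iff.mpr (by omega)]

theorem expandFrom_getCnt (r : List (Int × Int)) (m : Nat) :
    expandFrom r m (getCnt r m) = expandR (r.drop m) := by
  by_cases h : m < r.length
  · rw [expandFrom_eq r m _ h, List.drop_eq_getElem_cons h, expandR_cons]
    unfold getCnt
    rw [if_pos h]
    simp [List.getD, List.getElem?_eq_getElem h]
  · rw [expandFrom_nil r m _ (by omega), List.drop_eq_nil_iff.mpr (by omega)]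
    rfl

theorem pyListGt_nil_right (X : List Int) : pyListGt X [] = decide (X ≠ []) := by
  cases X <;> simp [pyListGt]

theorem pyListGt_cons_ne {v1 v2 : Int} (X Y : List Int) (h : v1 ≠ v2) :
    pyListGt (v1 :: X) (v2 :: Y) = decide (v1 > v2) := by
  rcases lt_trichotomy v1 v2 with hlt | heq | hgt
  · simp [pyListGt, hlt, not_lt.mpr hlt.le]
  · exact absurd heq h
  · simp [pyListGt, hgt]

theorem replicate_head (c : Int) (v : Int) (X : List Int) (h : 1 ≤ c) :
    List.replicate c.toNat v ++ X = v :: (List.replicate (c.toNat - 1) v ++ X) := by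
  have : c.toNat = (c.toNat - 1) + 1 := by omega
  rw [this, List.replicate_succ]
  simp

-- gtRunsGo computes Python's '>' on the expansions
theorem gtRunsGo_spec (a b : List (Int × Int))
    (ha : ∀ p ∈ a, 1 ≤ p.2) (hb : ∀ p ∈ b, 1 ≤ p.2) :
    ∀ (f : Nat) (i : Nat) (ca : Int) (j : Nat) (cb : Int),
      (a.length - i) + (b.length - j) ≤ f →
      (i < a.length → 1 ≤ ca) → (j < b.length → 1 ≤ cb) →
      gtRunsGo f a b i ca j cb = pyListGt (expandFrom a i ca) (expandFrom b j cb) := by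
  intro f
  induction f with
  | zero =>
    intro i ca j cb hf hca hcb
    have hi : a.length ≤ i := by omega
    have hj : b.length ≤ j := by omega
    rw [expandFrom_nil a i ca hi, expandFrom_nil b j cb hj]
    simp [gtRunsGo, pyListGt]; omega
  | succ f ih =>
    intro i ca j cb hf hca hcb
    rw [gtRunsGo]
    by_cases hij : i < a.length ∧ j < b.length
    · rw [if_pos hij]
      have h1 : 1 ≤ ca := hca hij.1
      have h2 : 1 ≤ cb := hcb hij.2
      set v1 := (a.getD i (0, 0)).1 with hv1
      set v2 := (b.getD j (0, 0)).1 with hv2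
      rw [expandFrom_eq a i ca hij.1, expandFrom_eq b j cb hij.2]
      by_cases hne : v1 ≠ v2
      · rw [if_pos hne]
        rw [replicate_head ca v1 _ h1, replicate_head cb v2 _ h2]
        rw [pyListGt_cons_ne _ _ hne]
      · rw [if_neg hne]
        simp only [ne_eq, not_not] at hne
        by_cases hcc : ca = cb
        · rw [if_pos hcc]
          have hrepl : List.replicate cb.toNat v2 = List.replicate ca.toNat v1 := by
            rw [hne, hcc]
          rw [hrepl, pyListGt_replicate]
          have := ih (i + 1) (getCnt a (i + 1)) (j + 1) (getCnt b (j + 1)) (by omega)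
            (fun h => by
              unfold getCnt; rw [if_pos h]
              simpa [List.getD, List.getElem?_eq_getElem h] using ha _ (List.getElem_mem h))
            (fun h => by
              unfold getCnt; rw [if_pos h]
              simpa [List.getD, List.getElem?_eq_getElem h] using hb _ (List.getElem_mem h))
          rw [this, expandFrom_getCnt, expandFrom_getCnt]
        · rw [if_neg hcc]
          by_cases hlt : ca < cb
          · rw [if_pos hlt]
            have hsplit : List.replicate cb.toNat v2 = List.replicate ca.toNat v1 ++ List.replicate (cb - ca).toNat v2 := by
              rw [hne, ← List.replicate_add]
              congr 1
              omega
            rw [hsplit, List.append_assoc, pyListGt_replicate]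
            have := ih (i + 1) (getCnt a (i + 1)) j (cb - ca) (by omega)
              (fun h => by
                unfold getCnt; rw [if_pos h]
                simpa [List.getD, List.getElem?_eq_getElem h] using ha _ (List.getElem_mem h))
              (fun _ => by omega)
            rw [this, expandFrom_getCnt, expandFrom_eq b j _ hij.2, ← hv2]
          · rw [if_neg hlt]
            have hgt : cb < ca := by omega
            have hsplit : List.replicate ca.toNat v1 = List.replicate cb.toNat v2 ++ List.replicate (ca - cb).toNat v1 := by
              rw [hne, ← List.replicate_add]
              congr 1
              omega
            rw [hsplit, List.append_assoc, pyListGt_replicate]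
            have := ih i (ca - cb) (j + 1) (getCnt b (j + 1)) (by omega)
              (fun _ => by omega)
              (fun h => by
                unfold getCnt; rw [if_pos h]
                simpa [List.getD, List.getElem?_eq_getElem h] using hb _ (List.getElem_mem h))
            rw [this, expandFrom_getCnt, expandFrom_eq a i _ hij.1, ← hv1]
    · rw [if_neg hij]
      by_cases hi : i < a.length
      · have hj : b.length ≤ j := by omega
        rw [expandFrom_nil b j cb hj]
        rw [pyListGt_nil_right]
        have h1 : 1 ≤ ca := hca hi
        rw [expandFrom_eq a i ca hi, replicate_head ca _ _ h1]
        simp [hi]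
      · rw [expandFrom_nil a i ca (by omega)]
        simp [pyListGt, hi]

-- the main loop of B runs A's merge on the expansions
theorem mloopGo_spec (a b : List (Int × Int))
    (ha : ∀ p ∈ a, 1 ≤ p.2) (hb : ∀ p ∈ b, 1 ≤ p.2) :
    ∀ (f : Nat) (i : Nat) (ca : Int) (j : Nat) (cb : Int),
      (expandFrom a i ca).length + (expandFrom b j cb).length ≤ f →
      (i < a.length → 1 ≤ ca) → (j < b.length → 1 ≤ cb) →
      mloopGo f a b i ca j cb = mergeGo f (expandFrom a i ca) (expandFrom b j cb) := by
  intro f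
  induction f with
  | zero => intro i ca j cb _ _ _; rfl
  | succ f ih =>
    intro i ca j cb hf hca hcb
    rw [mloopGo, mergeGo_succ]
    have hgt : gtRuns a b i ca j cb = pyListGt (expandFrom a i ca) (expandFrom b j cb) :=
      gtRunsGo_spec a b ha hb (a.length + b.length) i ca j cb (by omega) hca hcb
    by_cases hc : i < a.length ∨ j < b.length
    · rw [if_pos hc]
      have hne : ¬(expandFrom a i ca = [] ∧ expandFrom b j cb = []) := by
        rintro ⟨hA, hB⟩
        rcases hc with h | h
        · rw [expandFrom_eq a i ca h, replicate_head ca _ _ (hca h)] at hA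
          exact absurd hA (by simp)
        · rw [expandFrom_eq b j cb h, replicate_head cb _ _ (hcb h)] at hB
          exact absurd hB (by simp)
      rw [if_neg hne]
      by_cases hg : gtRuns a b i ca j cb
      · have hi : i < a.length := by
          by_contra hin
          rw [hgt, expandFrom_nil a i ca (by omega)] at hg
          simp [pyListGt] at hg
        have h1 : 1 ≤ ca := hca hi
        rw [if_pos hg]
        have hAeq : expandFrom a i ca =
            (a.getD i (0, 0)).1 :: (List.replicate (ca.toNat - 1) (a.getD i (0, 0)).1 ++ expandR (a.drop (i + 1))) := by
          rw [expandFrom_eq a i ca hi, replicate_head ca _ _ h1]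
        rw [hgt] at hg
        rw [if_pos hg, hAeq]
        have hlen : (List.replicate (ca.toNat - 1) (a.getD i (0, 0)).1 ++ expandR (a.drop (i + 1))).length
            + (expandFrom b j cb).length ≤ f := by
          have := congrArg List.length hAeq
          simp only [List.length_cons] at this
          omega
        by_cases h1' : ca - 1 = 0
        · rw [if_pos h1']
          have hca0 : ca.toNat - 1 = 0 := by omega
          have : List.replicate (ca.toNat - 1) (a.getD i (0, 0)).1 ++ expandR (a.drop (i + 1))
              = expandFrom a (i + 1) (getCnt a (i + 1)) := by
            rw [hca0, expandFrom_getCnt]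
            simp
          rw [this] at hlen ⊢
          rw [ih (i + 1) (getCnt a (i + 1)) j cb hlen
            (fun h => by
              unfold getCnt; rw [if_pos h]
              simpa [List.getD, List.getElem?_eq_getElem h] using ha _ (List.getElem_mem h))
            hcb]
        · rw [if_neg h1']
          have : List.replicate (ca.toNat - 1) (a.getD i (0, 0)).1 ++ expandR (a.drop (i + 1))
              = expandFrom a i (ca - 1) := by
            rw [expandFrom_eq a i _ hi]
            congr 1
            congr 1
            omega
          rw [this] at hlen ⊢
          rw [ih i (ca - 1) j cb hlen (fun _ => by omega) hcb]
      · have hj : j < b.length := by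
          by_contra hjn
          rcases hc with h | h
          · refine hg ?_
            rw [hgt, expandFrom_nil b j cb (by omega), pyListGt_nil_right]
            rw [expandFrom_eq a i ca h, replicate_head ca _ _ (hca h)]
            simp
          · exact hjn h
        have h2 : 1 ≤ cb := hcb hj
        rw [if_neg hg]
        rw [hgt] at hg
        rw [if_neg hg]
        have hBeq : expandFrom b j cb =
            (b.getD j (0, 0)).1 :: (List.replicate (cb.toNat - 1) (b.getD j (0, 0)).1 ++ expandR (b.drop (j + 1))) := by
          rw [expandFrom_eq b j cb hj, replicate_head cb _ _ h2]
        rw [hBeq]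
        have hlen : (expandFrom a i ca).length
            + (List.replicate (cb.toNat - 1) (b.getD j (0, 0)).1 ++ expandR (b.drop (j + 1))).length ≤ f := by
          have := congrArg List.length hBeq
          simp only [List.length_cons] at this
          omega
        by_cases h2' : cb - 1 = 0
        · rw [if_pos h2']
          have hcb0 : cb.toNat - 1 = 0 := by omega
          have : List.replicate (cb.toNat - 1) (b.getD j (0, 0)).1 ++ expandR (b.drop (j + 1))
              = expandFrom b (j + 1) (getCnt b (j + 1)) := by
            rw [hcb0, expandFrom_getCnt]
            simp
          rw [this] at hlen ⊢
          rw [ih i ca (j + 1) (getCnt b (j + 1)) hlen hca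
            (fun h => by
              unfold getCnt; rw [if_pos h]
              simpa [List.getD, List.getElem?_eq_getElem h] using hb _ (List.getElem_mem h))]
        · rw [if_neg h2']
          have : List.replicate (cb.toNat - 1) (b.getD j (0, 0)).1 ++ expandR (b.drop (j + 1))
              = expandFrom b j (cb - 1) := by
            rw [expandFrom_eq b j _ hj]
            congr 1
            congr 1
            omega
          rw [this] at hlen ⊢
          rw [ih i ca j (cb - 1) hlen hca (fun _ => by omega)]
    · rw [if_neg hc]
      rw [expandFrom_nil a i ca (by omega), expandFrom_nil b j cb (by omega)]
      simp

-- ===== VERDICT (by name: the statement is the Claim_ definition above) =====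
theorem mergeHelper_spec : Claim_equal_mergeHelper := by
  intro nums1 nums2 _
  unfold Spec_mergeHelper mergeHelper_alt mergeHelper
  obtain ⟨hA1, hA2⟩ := rleGo_spec nums1 nums1.length 0 (by omega)
  obtain ⟨hB1, hB2⟩ := rleGo_spec nums2 nums2.length 0 (by omega)
  simp only [List.drop_zero] at hA1 hB1
  have hEA : expandFrom (rle nums1) 0 (getCnt (rle nums1) 0) = nums1 := by
    rw [expandFrom_getCnt]
    simpa [rle] using hA1
  have hEB : expandFrom (rle nums2) 0 (getCnt (rle nums2) 0) = nums2 := by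
    rw [expandFrom_getCnt]
    simpa [rle] using hB1
  rw [mloopGo_spec (rle nums1) (rle nums2) hA2 hB2 (nums1.length + nums2.length) 0 _ 0 _
    (by rw [hEA, hEB]) (fun h => by
      unfold getCnt; rw [if_pos h]
      simpa [List.getD, List.getElem?_eq_getElem h] using hA2 _ (List.getElem_mem h))
    (fun h => by
      unfold getCnt; rw [if_pos h]
      simpa [List.getD, List.getElem?_eq_getElem h] using hB2 _ (List.getElem_mem h))]
  rw [hEA, hEB]
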